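-- pv_equiv track=rewrite | github.com/HeoSeokYong/AlgorithmStudy | Math/capsaicin.py | solution
-- ===== SOURCE A (Python) =====
-- from typing import List, Tuple, Callable
--
-- MOD = 1000000007
--
-- def solution(N:int, scoville_scale:List[int]) -> int:
--     result = 0
--
--     scoville_scale.sort()
--     max_spicy, min_spicy = 0, 0
--
--     for k in range(N//2):
--         max_spicy = (max_spicy + scoville_scale[-1-k]) % MOD
--         min_spicy = (min_spicy + scoville_scale[k]) % MOD
--
--         result += (max_spicy - min_spicy) * (pow(2, N-2-k, MOD) + pow(2, k, MOD)) % MOD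
--
--     if N % 2 == 0: # even
--         result -= (max_spicy - min_spicy) * pow(2, k, MOD) % MOD
--
--     return result % MOD
-- ===== SOURCE B (Python) =====
-- MOD = 1000000007
--
-- def solution(N, scoville_scale):
--     # Sorts the list in place like the original; single pass with closed-form
--     # per-element weights 2^(N-1-j) - 2^j instead of running prefix-sum
--     # accumulators plus an even-N correction.
--     scoville_scale.sort()
--     total = 0
--     for j in range(N // 2):
--         total += (scoville_scale[-1 - j] - scoville_scale[j]) * (pow(2, N - 1 - j, MOD) - pow(2, j, MOD))
--     return total % MOD
-- ===== Notes on version B (the rewrite author's own statement) =====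
-- stated objective: simpler
-- what changed: Replaces A's half-length loop over two coupled running prefix-sum accumulators plus an even-N correction term by a single pass that gives each of the N//2 outer pairs the closed-form weight 2^(N-1-j) - 2^j (Abel-summation of A's weights), sorting the list in place like A.
-- crash fix: On even N <= 0 A raises UnboundLocalError (the even branch reads the loop variable k that the empty loop never assigned), while B's empty loop returns 0. — e.g. on solution(0, []): A raises UnboundLocalError, B returns 0
import Mathlib
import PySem

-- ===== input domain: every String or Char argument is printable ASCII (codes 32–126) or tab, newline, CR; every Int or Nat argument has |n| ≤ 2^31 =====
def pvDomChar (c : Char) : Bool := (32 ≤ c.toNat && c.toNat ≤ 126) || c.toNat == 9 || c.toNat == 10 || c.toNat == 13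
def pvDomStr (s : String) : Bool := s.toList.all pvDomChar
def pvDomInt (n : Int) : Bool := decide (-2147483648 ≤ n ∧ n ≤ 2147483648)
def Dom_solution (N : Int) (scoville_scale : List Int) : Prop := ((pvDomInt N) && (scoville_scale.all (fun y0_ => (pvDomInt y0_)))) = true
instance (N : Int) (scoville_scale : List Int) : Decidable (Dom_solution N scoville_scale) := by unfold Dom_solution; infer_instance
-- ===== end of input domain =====

-- B replaces A's pair of running prefix-sum accumulators plus an even-N correction by one pass
-- with a closed-form weight 2^(N-1-j) - 2^j per element (objective: simpler).
-- Both A and B sort scoville_scale in place; the equivalence proved here is about the return value.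

-- ===== PORT A =====
-- loop body of A's 'for k in range(N//2)' (state: result, max_spicy, min_spicy)
def pvStepA (N : Int) (ss : List Int) (s : Int × Int × Int) (k : Int) : Int × Int × Int :=
  -- ss[-1-k] / ss[k]: in range under Pre_solution (Python raises IndexError otherwise)
  let mx := PySem.Int.mod (s.2.1 + PySem.List.pyGetD ss (-1 - k) 0) 1000000007
  let mn := PySem.Int.mod (s.2.2 + PySem.List.pyGetD ss k 0) 1000000007
  -- pow(2, N-2-k, MOD): exponent is ≥ 0 whenever the loop runs under Pre_solution, so .toNat is exact
  (s.1 + PySem.Int.mod ((mx - mn) * (PySem.Int.powMod 2 (N - 2 - k).toNat 1000000007 +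
      PySem.Int.powMod 2 k.toNat 1000000007)) 1000000007, mx, mn)

def solution (N : Int) (scoville_scale : List Int) : Int :=
  let ss := PySem.List.sorted scoville_scale (fun x => x) false
  let st := (PySem.List.pyRange 0 (PySem.Int.floordiv N 2) 1).foldl (pvStepA N ss) (0, 0, 0)
  -- the even branch reads Python's leftover loop variable k = N//2 - 1; under Pre_solution the
  -- branch is reached only after the loop ran (A raises UnboundLocalError otherwise — see Raises_)
  PySem.Int.mod
    (if PySem.Int.mod N 2 = 0 then
      st.1 - PySem.Int.mod ((st.2.1 - st.2.2) *
        PySem.Int.powMod 2 (PySem.Int.floordiv N 2 - 1).toNat 1000000007) 1000000007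
    else st.1) 1000000007

-- ===== PORT B =====
-- loop body of B's 'for j in range(N//2)'
def pvStepB (N : Int) (ss : List Int) (acc : Int) (j : Int) : Int :=
  -- exponents N-1-j and j are ≥ 0 whenever the loop runs, so .toNat is exact
  acc + (PySem.List.pyGetD ss (-1 - j) 0 - PySem.List.pyGetD ss j 0) *
    (PySem.Int.powMod 2 (N - 1 - j).toNat 1000000007 - PySem.Int.powMod 2 j.toNat 1000000007)

def solution_alt (N : Int) (scoville_scale : List Int) : Int :=
  let ss := PySem.List.sorted scoville_scale (fun x => x) false
  PySem.Int.mod ((PySem.List.pyRange 0 (PySem.Int.floordiv N 2) 1).foldl (pvStepB N ss) 0) 1000000007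

-- ===== PRECONDITION & SPEC =====
-- Pre_ excludes exactly the inputs where the Python A raises: even N ≤ 0 (the even branch reads the
-- unbound loop variable k → UnboundLocalError) and N//2 > len(scoville_scale) (IndexError in the loop).
def Pre_solution (N : Int) (scoville_scale : List Int) : Prop :=
  (PySem.Int.mod N 2 = 0 → 2 ≤ N) ∧ PySem.Int.floordiv N 2 ≤ (scoville_scale.length : Int)
instance (N : Int) (scoville_scale : List Int) : Decidable (Pre_solution N scoville_scale) := by
  unfold Pre_solution; infer_instance

def pvWitness_solution : Int × List Int := (4, [1, 2, 3, 9])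

-- On even N ≤ 0 A raises UnboundLocalError (the even branch reads the never-assigned loop
-- variable k), while B's empty loop returns 0.
def Raises_solution (N : Int) (scoville_scale : List Int) : Prop :=
  N ≤ 0 ∧ PySem.Int.mod N 2 = 0
instance (N : Int) (scoville_scale : List Int) : Decidable (Raises_solution N scoville_scale) := by
  unfold Raises_solution; infer_instance
def pvRaiseWitness_solution : Int × List Int := (0, [])
def pvRaiseWitnessOut_solution : Int := 0

def Spec_solution (N : Int) (scoville_scale : List Int) (out : Int) : Prop := out = solution_alt N scoville_scale
instance (N : Int) (scoville_scale : List Int) (out : Int) : Decidable (Spec_solution N scoville_scale out) := by unfold Spec_solution; infer_instance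

-- ===== CLAIM (what is proved, stated in full; the proofs are below) =====
def Claim_equal_solution : Prop := ∀ (N : Int) (scoville_scale : List Int), Dom_solution N scoville_scale → Pre_solution N scoville_scale → Spec_solution N scoville_scale (solution N scoville_scale)

def Claim_raises_solution : Prop :=
  (∀ (N : Int) (scoville_scale : List Int), Dom_solution N scoville_scale → Raises_solution N scoville_scale → ¬ Pre_solution N scoville_scale) ∧
  (Dom_solution (pvRaiseWitness_solution.1) (pvRaiseWitness_solution.2) ∧ Raises_solution (pvRaiseWitness_solution.1) (pvRaiseWitness_solution.2) ∧ solution_alt (pvRaiseWitness_solution.1) (pvRaiseWitness_solution.2) = pvRaiseWitnessOut_solution)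

-- ===== LEMMAS AND PROOFS =====

-- the two indexed values both loops read at position j, as residues
def pvTop (t : List Int) (j : ℕ) : ZMod 1000000007 :=
  ((PySem.List.pyGetD t (-1 - (j : Int)) 0 : Int) : ZMod 1000000007)
def pvBot (t : List Int) (j : ℕ) : ZMod 1000000007 :=
  ((PySem.List.pyGetD t ((j : Int)) 0 : Int) : ZMod 1000000007)

lemma pvCastMod (x : Int) :
    ((PySem.Int.mod x 1000000007 : Int) : ZMod 1000000007) = (x : ZMod 1000000007) := by
  rw [PySem.Int.mod_eq_emod_of_pos (by norm_num)]
  simpa using ZMod.intCast_mod x 1000000007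

lemma pvCastPow (e : ℕ) :
    ((PySem.Int.powMod 2 e 1000000007 : Int) : ZMod 1000000007) = (2 : ZMod 1000000007) ^ e := by
  rw [PySem.Int.powMod_eq, pvCastMod]; push_cast; ring

lemma pvModCongr (a b : Int) (hc : (a : ZMod 1000000007) = (b : ZMod 1000000007)) :
    PySem.Int.mod a 1000000007 = PySem.Int.mod b 1000000007 := by
  rw [PySem.Int.mod_eq_emod_of_pos (by norm_num), PySem.Int.mod_eq_emod_of_pos (by norm_num)]
  have := (ZMod.intCast_eq_intCast_iff' a b 1000000007).mp hc
  exact_mod_cast this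

lemma pvGeom (a b : ℕ) (hab : a ≤ b) :
    ∑ k ∈ Finset.Ico a b, (2 : ZMod 1000000007) ^ k = 2 ^ b - 2 ^ a := by
  rw [Finset.sum_Ico_eq_sub _ hab]
  have g : ∀ n : ℕ, ∑ i ∈ Finset.range n, (2 : ZMod 1000000007) ^ i = 2 ^ n - 1 := by
    intro n; have := geom_sum_mul (2 : ZMod 1000000007) n; norm_num at this; exact this
  rw [g, g]; ring

lemma pvGeomDown (j h m : ℕ) (hjh : j ≤ h) (hhm : h ≤ m + 1) :
    ∑ k ∈ Finset.Ico j h, (2 : ZMod 1000000007) ^ (m - k) = 2 ^ (m + 1 - j) - 2 ^ (m + 1 - h) := by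
  rw [Finset.sum_Ico_reflect _ _ hhm]
  exact pvGeom _ _ (by omega)

-- Abel summation: a sum of (running prefix sum) * weight is a sum of element * (tail weight sum)
lemma pvAbel (d w : ℕ → ZMod 1000000007) (h : ℕ) :
    ∑ k ∈ Finset.range h, (∑ j ∈ Finset.range (k + 1), d j) * w k
      = ∑ j ∈ Finset.range h, d j * (∑ k ∈ Finset.Ico j h, w k) := by
  induction h with
  | zero => simp
  | succ n ih =>
    have hsplit : ∀ j ∈ Finset.range (n + 1),
        d j * ∑ k ∈ Finset.Ico j (n + 1), w k = d j * ∑ k ∈ Finset.Ico j n, w k + d j * w n := by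
      intro j hj
      rw [Finset.sum_Ico_succ_top (by simpa using Nat.lt_succ_iff.mp (Finset.mem_range.mp hj))]
      ring
    rw [Finset.sum_range_succ, ih, Finset.sum_congr rfl hsplit, Finset.sum_add_distrib,
      Finset.sum_range_succ (f := fun j => d j * ∑ k ∈ Finset.Ico j n, w k), ← Finset.sum_mul]
    simp

lemma pvFoldA (N : Int) (t : List Int) (n : ℕ) :
    let st := (PySem.List.pyRange 0 (n : Int) 1).foldl (pvStepA N t) (0, 0, 0)
    ((st.2.1 : Int) : ZMod 1000000007) = ∑ j ∈ Finset.range n, pvTop t j ∧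
    ((st.2.2 : Int) : ZMod 1000000007) = ∑ j ∈ Finset.range n, pvBot t j ∧
    ((st.1 : Int) : ZMod 1000000007) =
      ∑ k ∈ Finset.range n, (∑ j ∈ Finset.range (k + 1), (pvTop t j - pvBot t j)) *
        ((2 : ZMod 1000000007) ^ (N - 2 - (k : Int)).toNat + 2 ^ k) := by
  induction n with
  | zero => simp [PySem.List.pyRange_one_eq_nil]
  | succ n ih =>
    obtain ⟨ih1, ih2, ih3⟩ := ih
    have hcast : ((n + 1 : ℕ) : Int) = (n : Int) + 1 := by push_cast; ring
    rw [hcast, PySem.List.pyRange_one_succ_right (by positivity), List.foldl_append]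
    simp only [List.foldl_cons, List.foldl_nil]
    refine ⟨?_, ?_, ?_⟩
    · simp only [pvStepA, pvCastMod, Int.cast_add, ih1, Finset.sum_range_succ, pvTop]
    · simp only [pvStepA, pvCastMod, Int.cast_add, ih2, Finset.sum_range_succ, pvBot]
    · simp only [pvStepA, Int.cast_add, pvCastMod, Int.cast_mul, Int.cast_sub, pvCastPow, ih1,
        ih2, ih3, Finset.sum_range_succ (n := n), pvTop, pvBot, Int.toNat_natCast]
      congr 1
      rw [Finset.sum_sub_distrib]
      ring

lemma pvFoldB (N : Int) (t : List Int) (n : ℕ) :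
    (((PySem.List.pyRange 0 (n : Int) 1).foldl (pvStepB N t) 0 : Int) : ZMod 1000000007) =
      ∑ j ∈ Finset.range n, (pvTop t j - pvBot t j) *
        ((2 : ZMod 1000000007) ^ (N - 1 - (j : Int)).toNat - 2 ^ j) := by
  induction n with
  | zero => simp [PySem.List.pyRange_one_eq_nil]
  | succ n ih =>
    have hcast : ((n + 1 : ℕ) : Int) = (n : Int) + 1 := by push_cast; ring
    rw [hcast, PySem.List.pyRange_one_succ_right (by positivity), List.foldl_append]
    simp only [List.foldl_cons, List.foldl_nil, pvStepB, Int.cast_add, Int.cast_mul, Int.cast_sub,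
      pvCastPow, ih, Finset.sum_range_succ, pvTop, pvBot, Int.toNat_natCast]

-- ===== VERDICT (by name: the statement is the Claim_ definition above) =====
theorem solution_spec : Claim_equal_solution := by
  intro N s _ hpre
  unfold Spec_solution solution solution_alt
  obtain ⟨hev, _⟩ := hpre
  by_cases hle : PySem.Int.floordiv N 2 ≤ 0
  · -- empty loop; the even branch is not taken (even N would force 2 ≤ N, hence 1 ≤ N//2)
    have hodd : ¬ PySem.Int.mod N 2 = 0 := by
      intro h0
      have h2 : (1 : Int) ≤ PySem.Int.floordiv N 2 :=
        (PySem.Int.le_floordiv_iff_mul_le (by norm_num)).mpr (by simpa using hev h0)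
      omega
    rw [PySem.List.pyRange_one_eq_nil hle]
    simp only [List.foldl_nil]
    rw [if_neg hodd]
  · replace hle : 0 < PySem.Int.floordiv N 2 := by omega
    set t := PySem.List.sorted s (fun x => x) false with ht
    obtain ⟨hn, hhn⟩ : ∃ hn : ℕ, PySem.Int.floordiv N 2 = (hn : Int) :=
      ⟨(PySem.Int.floordiv N 2).toNat, (Int.toNat_of_nonneg (by omega)).symm⟩
    have hn1 : 1 ≤ hn := by omega
    have hNeq := PySem.Int.floordiv_mul_add_mod N 2
    have hm01 : PySem.Int.mod N 2 = 0 ∨ PySem.Int.mod N 2 = 1 := by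
      have := PySem.Int.mod_nonneg N (b := 2) (by norm_num)
      have := PySem.Int.mod_lt N (b := 2) (by norm_num)
      omega
    obtain ⟨hA1, hA2, hA3⟩ := pvFoldA N t hn
    have hB := pvFoldB N t hn
    rw [hhn]
    simp only []
    rcases hm01 with hm | hm
    · -- N = 2*hn
      have hN : N = 2 * (hn : Int) := by omega
      rw [if_pos hm]
      apply pvModCongr
      push_cast [pvCastMod, pvCastPow, hA1, hA2, hA3, hB]
      have hexp : ∀ k ∈ Finset.range hn,
          (∑ j ∈ Finset.range (k + 1), (pvTop t j - pvBot t j)) *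
            ((2 : ZMod 1000000007) ^ (N - 2 - (k : Int)).toNat + 2 ^ k)
          = (∑ j ∈ Finset.range (k + 1), (pvTop t j - pvBot t j)) *
            ((2 : ZMod 1000000007) ^ (2 * hn - 2 - k) + 2 ^ k) := by
        intro k hk
        have hk' := Finset.mem_range.mp hk
        have : (N - 2 - (k : Int)).toNat = 2 * hn - 2 - k := by omega
        rw [this]
      rw [Finset.sum_congr rfl hexp, pvAbel (fun j => pvTop t j - pvBot t j)
        (fun k => (2 : ZMod 1000000007) ^ (2 * hn - 2 - k) + 2 ^ k)]
      have hcoef : ((hn : Int) - 1).toNat = hn - 1 := by omega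
      rw [hcoef, ← Finset.sum_sub_distrib, Finset.sum_mul, ← Finset.sum_sub_distrib]
      refine Finset.sum_congr rfl ?_
      intro j hj
      have hj' := Finset.mem_range.mp hj
      rw [Finset.sum_add_distrib, pvGeomDown j hn (2 * hn - 2) (by omega) (by omega),
        pvGeom j hn (by omega)]
      have he1 : (N - 1 - (j : Int)).toNat = 2 * hn - 2 + 1 - j := by omega
      have he2 : (2 * hn - 2 + 1 - hn) = hn - 1 := by omega
      have he3 : (2 : ZMod 1000000007) ^ hn = 2 ^ (hn - 1) * 2 := by
        rw [← pow_succ]; congr 1; omega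
      rw [he1, he2, he3]
      ring
    · -- N = 2*hn + 1
      have hN : N = 2 * (hn : Int) + 1 := by omega
      have hne : ¬ PySem.Int.mod N 2 = 0 := by omega
      rw [if_neg hne]
      apply pvModCongr
      rw [hA3, hB]
      have hexp : ∀ k ∈ Finset.range hn,
          (∑ j ∈ Finset.range (k + 1), (pvTop t j - pvBot t j)) *
            ((2 : ZMod 1000000007) ^ (N - 2 - (k : Int)).toNat + 2 ^ k)
          = (∑ j ∈ Finset.range (k + 1), (pvTop t j - pvBot t j)) *
            ((2 : ZMod 1000000007) ^ (2 * hn - 1 - k) + 2 ^ k) := by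
        intro k hk
        have hk' := Finset.mem_range.mp hk
        have : (N - 2 - (k : Int)).toNat = 2 * hn - 1 - k := by omega
        rw [this]
      rw [Finset.sum_congr rfl hexp, pvAbel (fun j => pvTop t j - pvBot t j)
        (fun k => (2 : ZMod 1000000007) ^ (2 * hn - 1 - k) + 2 ^ k)]
      refine Finset.sum_congr rfl ?_
      intro j hj
      have hj' := Finset.mem_range.mp hj
      rw [Finset.sum_add_distrib, pvGeomDown j hn (2 * hn - 1) (by omega) (by omega),
        pvGeom j hn (by omega)]
      have he1 : (N - 1 - (j : Int)).toNat = 2 * hn - 1 + 1 - j := by omega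
      have he2 : (2 * hn - 1 + 1 - hn) = hn := by omega
      rw [he1, he2]
      ring

theorem solution_raises : Claim_raises_solution := by
  unfold Claim_raises_solution
  refine ⟨?_, by decide⟩
  rintro N s _ ⟨h1, h2⟩ ⟨hp, _⟩
  have := hp h2
  omega

-- self-check: the witness value pinned in Claim_raises_solution is indeed B's output there
theorem pvRaiseWitnessOut_ok :
    solution_alt pvRaiseWitness_solution.1 pvRaiseWitness_solution.2 = pvRaiseWitnessOut_solution :=
  solution_raises.2.2.2
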